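-- pv_equiv track=rewrite | github.com/Erwin2307-py/Search | main2.py | _wrap_long_words
-- ===== SOURCE A (Python) =====
-- def _wrap_long_words(text, max_len=80):
--     words = text.split()
--     result = []
--     while words:
--         w = words.pop(0)
--         while len(w) > max_len:
--             result.append(w[:max_len])
--             w = w[max_len:]
--         result.append(w)
--     return " ".join(result)
-- ===== SOURCE B (Python) =====
-- def _wrap_long_words(text, max_len=80):
--     chunks = [w[i:i + max_len] for w in text.split() for i in range(0, len(w), max_len)]
--     return " ".join(chunks)
-- ===== Notes on version B (the rewrite author's own statement) =====
-- stated objective: idiomatic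
-- what changed: Replaces the word-consuming pop(0) loop with a nested while that repeatedly truncates the word prefix (w = w[max_len:]) by a single comprehension that computes each word's chunk offsets directly with range stepping and joins once.
import Mathlib
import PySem

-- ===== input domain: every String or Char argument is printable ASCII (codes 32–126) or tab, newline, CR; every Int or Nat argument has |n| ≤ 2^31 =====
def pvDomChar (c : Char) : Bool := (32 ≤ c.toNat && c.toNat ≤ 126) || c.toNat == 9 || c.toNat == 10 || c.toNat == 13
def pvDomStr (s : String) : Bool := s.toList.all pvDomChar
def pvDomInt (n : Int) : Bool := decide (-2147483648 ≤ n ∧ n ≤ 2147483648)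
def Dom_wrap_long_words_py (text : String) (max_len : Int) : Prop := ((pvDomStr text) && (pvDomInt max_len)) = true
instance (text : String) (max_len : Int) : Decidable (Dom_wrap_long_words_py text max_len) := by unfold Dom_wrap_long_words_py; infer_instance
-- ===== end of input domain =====

-- B replaces A's word-consuming pop(0) loop and its repeated prefix-truncation (w = w[max_len:])
-- by directly computing each word's chunk offsets with range stepping (idiomatic one-liner); return values agree.

-- ===== PORT A =====
-- inner 'while len(w) > max_len' loop; fuel = w.length suffices for max_len ≥ 1 (each pass drops ≥ 1 char)
def wrapAInner (fuel : Nat) (w : List Char) (max_len : Int) (result : List (List Char)) : List (List Char) :=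
  match fuel with
  | 0 => result ++ [w]
  | f + 1 =>
    if max_len < (w.length : Int) then
      wrapAInner f (PySem.List.slice w (some max_len) none) max_len
        (result ++ [PySem.List.slice w none (some max_len)])
    else result ++ [w]

-- outer 'while words: w = words.pop(0)' loop
def wrapAOuter (words : List (List Char)) (max_len : Int) (result : List (List Char)) : List (List Char) :=
  match words with
  | [] => result
  | w :: rest => wrapAOuter rest max_len (wrapAInner w.length w max_len result)

def wrap_long_words_py (text : String) (max_len : Int) : String :=
  String.ofList (PySem.Chars.join [' '] (wrapAOuter (PySem.Chars.split₀ text.toList) max_len []))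

-- ===== PORT B =====
def wrap_long_words_py_alt (text : String) (max_len : Int) : String :=
  String.ofList (PySem.Chars.join [' ']
    ((PySem.Chars.split₀ text.toList).flatMap (fun w =>
      (PySem.List.pyRange 0 (w.length : Int) max_len).map
        (fun i => PySem.List.slice w (some i) (some (i + max_len))))))

-- ===== PRECONDITION & SPEC =====
-- Pre_ excludes exactly the inputs on which Python A DIVERGES (never returns): max_len ≤ 0 with at
-- least one word, where the while loop re-reads the same w forever (w[:0]='' appended endlessly).
def Pre_wrap_long_words_py (text : String) (max_len : Int) : Prop :=
  0 < max_len ∨ PySem.Chars.split₀ text.toList = []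
instance (text : String) (max_len : Int) : Decidable (Pre_wrap_long_words_py text max_len) := by
  unfold Pre_wrap_long_words_py; infer_instance

def pvWitness_wrap_long_words_py : String × Int := ("hello big world", 3)

def Spec_wrap_long_words_py (text : String) (max_len : Int) (out : String) : Prop := out = wrap_long_words_py_alt text max_len
instance (text : String) (max_len : Int) (out : String) : Decidable (Spec_wrap_long_words_py text max_len out) := by unfold Spec_wrap_long_words_py; infer_instance

-- ===== CLAIM (what is proved, stated in full; the proofs are below) =====
def Claim_equal_wrap_long_words_py : Prop := ∀ (text : String) (max_len : Int), Dom_wrap_long_words_py text max_len → Pre_wrap_long_words_py text max_len → Spec_wrap_long_words_py text max_len (wrap_long_words_py text max_len)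

-- ===== LEMMAS AND PROOFS =====

-- pieces of text.split() are never empty
theorem split₀_go_ne_nil (s : List Char) : ∀ (cur : List Char) (acc : List (List Char)),
    (∀ w ∈ acc, w ≠ []) → ∀ w ∈ PySem.Chars.split₀.go s cur acc, w ≠ [] := by
  induction s with
  | nil =>
    intro cur acc hacc w hw
    simp only [PySem.Chars.split₀.go] at hw
    split at hw
    · exact hacc w (List.mem_reverse.mp hw)
    · rcases List.mem_cons.mp (List.mem_reverse.mp hw) with h | h
      · subst h; simpa using List.isEmpty_eq_false_iff.mp (by simpa using ‹¬ cur.isEmpty = true›)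
      · exact hacc w h
  | cons c rest ih =>
    intro cur acc hacc w hw
    simp only [PySem.Chars.split₀.go] at hw
    split at hw
    · split at hw
      · exact ih [] acc hacc w hw
      · refine ih [] (cur.reverse :: acc) ?_ w hw
        intro v hv
        rcases List.mem_cons.mp hv with h | h
        · subst h; simpa using List.isEmpty_eq_false_iff.mp (by simpa using ‹¬ cur.isEmpty = true›)
        · exact hacc v h
    · exact ih (c :: cur) acc hacc w hw

theorem split₀_ne_nil (cs : List Char) : ∀ w ∈ PySem.Chars.split₀ cs, w ≠ [] := by
  intro w hw
  exact split₀_go_ne_nil cs [] [] (by simp) w hw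

-- the inner loop only appends to result
theorem wrapAInner_acc (m : Int) : ∀ (fuel : Nat) (w : List Char) (acc : List (List Char)),
    wrapAInner fuel w m acc = acc ++ wrapAInner fuel w m [] := by
  intro fuel
  induction fuel with
  | zero => intro w acc; simp [wrapAInner]
  | succ f ih =>
    intro w acc
    simp only [wrapAInner]
    split
    · rw [ih _ (acc ++ _), ih _ ([] ++ _)]
      simp
    · simp

-- the outer loop is a flatMap of the inner loop over the words
theorem wrapAOuter_eq (m : Int) : ∀ (words : List (List Char)) (acc : List (List Char)),
    wrapAOuter words m acc = acc ++ words.flatMap (fun w => wrapAInner w.length w m []) := by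
  intro words
  induction words with
  | nil => intro acc; simp [wrapAOuter]
  | cons w rest ih =>
    intro acc
    simp only [wrapAOuter, List.flatMap_cons]
    rw [ih, wrapAInner_acc]
    simp

-- reference chunker: take/drop steps of size M
def chunkRec (fuel : Nat) (M : Nat) (w : List Char) : List (List Char) :=
  match fuel with
  | 0 => [w]
  | f + 1 => if M < w.length then w.take M :: chunkRec f M (w.drop M) else [w]

theorem wrapAInner_eq_chunkRec {m : Int} (hm : 0 < m) : ∀ (fuel : Nat) (w : List Char),
    wrapAInner fuel w m [] = chunkRec fuel m.toNat w := by
  intro fuel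
  induction fuel with
  | zero => intro w; simp [wrapAInner, chunkRec]
  | succ f ih =>
    intro w
    simp only [wrapAInner, chunkRec]
    have hcmp : (m < (w.length : Int)) ↔ (m.toNat < w.length) := by omega
    by_cases h : m.toNat < w.length
    · rw [if_pos (hcmp.mpr h), if_pos h]
      rw [wrapAInner_acc, ih]
      rw [PySem.List.slice_from w (le_of_lt hm), PySem.List.slice_to w (le_of_lt hm)]
      simp
    · rw [if_neg (fun hc => h (hcmp.mp hc)), if_neg h]
      simp

-- chunkRec ignores the fuel beyond w.length (for positive M)
theorem chunkRec_fuel {M : Nat} (hM : 0 < M) : ∀ (f g : Nat) (w : List Char),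
    w.length ≤ f → w.length ≤ g → chunkRec f M w = chunkRec g M w := by
  intro f
  induction f with
  | zero =>
    intro g w hf _
    have : w = [] := List.eq_nil_of_length_eq_zero (by omega)
    subst this
    cases g <;> simp [chunkRec]
  | succ f ih =>
    intro g w hf hg
    by_cases h : M < w.length
    · have hg1 : 1 ≤ g := by omega
      obtain ⟨g', rfl⟩ : ∃ g', g = g' + 1 := ⟨g - 1, by omega⟩
      simp only [chunkRec, if_pos h]
      have hlen : (w.drop M).length = w.length - M := by simp
      rw [ih g' (w.drop M) (by omega) (by omega)]
    · cases g <;> simp [chunkRec, h]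

-- range with positive step: empty when b ≤ a, cons otherwise
theorem pyRange_pos_nil {m : Int} (hm : 0 < m) (a b : Int) (h : b ≤ a) :
    PySem.List.pyRange a b m = [] := by
  rw [PySem.List.pyRange_of_pos a b hm]
  rw [if_neg (by omega)]
  simp

theorem pyRange_pos_cons {m : Int} (hm : 0 < m) (a b : Int) (h : a < b) :
    PySem.List.pyRange a b m = a :: PySem.List.pyRange (a + m) b m := by
  rw [PySem.List.pyRange_of_pos a b hm, PySem.List.pyRange_of_pos (a + m) b hm]
  by_cases h2 : a + m < b
  · rw [if_pos h, if_pos h2]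
    have harith : ((b - a + m - 1) / m).toNat = ((b - (a + m) + m - 1) / m).toNat + 1 := by
      have h1 : b - a + m - 1 = (b - (a + m) + m - 1) + 1 * m := by ring
      rw [h1, Int.add_mul_ediv_right _ _ (by omega)]
      have : 0 ≤ (b - (a + m) + m - 1) / m := Int.ediv_nonneg (by omega) (by omega)
      omega
    rw [harith, List.range_succ_eq_map]
    simp only [List.map_cons, List.map_map]
    refine List.cons_eq_cons.mpr ⟨by simp, ?_⟩
    apply List.map_congr_left
    intro k _
    simp [Function.comp, Nat.succ_eq_add_one]
    ring
  · rw [if_pos h, if_neg h2]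
    have harith : ((b - a + m - 1) / m).toNat = 1 := by
      have h1 : PySem.Int.floordiv (b - a + m - 1) m = 1 :=
        (PySem.Int.floordiv_eq_iff_of_pos hm).mpr ⟨by omega, by omega⟩
      rw [PySem.Int.floordiv_eq_ediv_of_pos hm] at h1
      omega
    rw [harith]
    simp

-- shift a positive-step range down by one step
theorem pyRange_shift {m : Int} (hm : 0 < m) (a b : Int) :
    PySem.List.pyRange (a + m) b m = (PySem.List.pyRange a (b - m) m).map (· + m) := by
  rw [PySem.List.pyRange_of_pos (a + m) b hm, PySem.List.pyRange_of_pos a (b - m) hm]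
  have hcond : (a + m < b) ↔ (a < b - m) := by omega
  have harg : b - (a + m) + m - 1 = (b - m) - a + m - 1 := by ring
  rw [harg]
  by_cases h : a < b - m
  · rw [if_pos (hcond.mpr h), if_pos h, List.map_map]
    apply List.map_congr_left
    intro k _
    simp; ring
  · rw [if_neg (fun hc => h (hcond.mp hc)), if_neg h]; simp

-- B's chunk list for one word equals the reference chunker
theorem chunksB_eq_chunkRec {m : Int} (hm : 0 < m) : ∀ (w : List Char), w ≠ [] →
    (PySem.List.pyRange 0 (w.length : Int) m).map
        (fun i => PySem.List.slice w (some i) (some (i + m)))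
      = chunkRec w.length m.toNat w := by
  intro w
  induction hw : w.length using Nat.strong_induction_on generalizing w with
  | _ n ih =>
  intro hne
  subst hw
  have hlen : 0 < w.length := List.length_pos_iff.mpr hne
  by_cases h : m.toNat < w.length
  · -- long word: peel one chunk
    rw [pyRange_pos_cons hm 0 _ (by omega)]
    simp only [List.map_cons]
    rw [pyRange_shift hm 0 _]
    rw [List.map_map]
    have hdroplen : ((w.drop m.toNat).length : Int) = (w.length : Int) - m := by
      simp; omega
    have htail :
        (PySem.List.pyRange 0 ((w.length : Int) - m) m).map
            ((fun i => PySem.List.slice w (some i) (some (i + m))) ∘ (· + m))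
          = (PySem.List.pyRange 0 ((w.drop m.toNat).length : Int) m).map
            (fun i => PySem.List.slice (w.drop m.toNat) (some i) (some (i + m))) := by
      rw [hdroplen]
      apply List.map_congr_left
      intro i hi
      have hi0 : 0 ≤ i := ((PySem.List.mem_pyRange_iff_of_pos hm i).mp hi).1
      simp only [Function.comp_apply]
      rw [PySem.List.slice_toNat _ (by omega) (by omega),
          PySem.List.slice_toNat _ (by omega) (by omega)]
      rw [List.drop_drop]
      have e1 : (i + m + m).toNat - (i + m).toNat = (i + m).toNat - i.toNat := by omega
      have e2 : (i + m).toNat = i.toNat + m.toNat := by omega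
      rw [e1, e2, Nat.add_comm i.toNat m.toNat]
    rw [htail]
    have hd_ne : w.drop m.toNat ≠ [] := by
      intro hc
      have := congrArg List.length hc
      simp at this; omega
    rw [ih (w.drop m.toNat).length (by simp; omega) (w.drop m.toNat) rfl hd_ne]
    -- head chunk
    have hhead : PySem.List.slice w (some 0) (some (0 + m)) = w.take m.toNat := by
      rw [PySem.List.slice_toNat _ (by omega) (by omega)]
      simp
    rw [hhead]
    -- fold into chunkRec
    obtain ⟨n', hn'⟩ : ∃ n', w.length = n' + 1 := ⟨w.length - 1, by omega⟩
    rw [hn']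
    simp only [chunkRec]
    rw [if_pos h]
    congr 1
    exact chunkRec_fuel (by omega) _ _ _ (le_refl _) (by simp; omega)
  · -- short word: single chunk
    rw [pyRange_pos_cons hm 0 _ (by omega)]
    rw [pyRange_pos_nil hm _ _ (by omega)]
    simp only [List.map_cons, List.map_nil]
    have hhead : PySem.List.slice w (some 0) (some (0 + m)) = w := by
      rw [PySem.List.slice_toNat _ (by omega) (by omega)]
      simp only [Int.toNat_zero, List.drop_zero]
      apply List.take_of_length_le
      omega
    rw [hhead]
    obtain ⟨n', hn'⟩ : ∃ n', w.length = n' + 1 := ⟨w.length - 1, by omega⟩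
    rw [hn']
    simp only [chunkRec]
    rw [if_neg h]

-- word-by-word agreement lifted to the whole word list
theorem flatMap_inner_eq_chunksB {m : Int} (hm : 0 < m) :
    ∀ (ws : List (List Char)), (∀ w ∈ ws, w ≠ []) →
    ws.flatMap (fun w => wrapAInner w.length w m [])
      = ws.flatMap (fun w =>
          (PySem.List.pyRange 0 (w.length : Int) m).map
            (fun i => PySem.List.slice w (some i) (some (i + m)))) := by
  intro ws
  induction ws with
  | nil => intro _; rfl
  | cons w rest ih =>
    intro h
    simp only [List.flatMap_cons]
    rw [wrapAInner_eq_chunkRec hm, chunksB_eq_chunkRec hm w (h w (by simp)),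
        ih (fun v hv => h v (by simp [hv]))]

-- ===== VERDICT (by name: the statement is the Claim_ definition above) =====
theorem wrap_long_words_py_spec : Claim_equal_wrap_long_words_py := by
  intro text max_len _hdom hpre
  unfold Spec_wrap_long_words_py wrap_long_words_py wrap_long_words_py_alt
  rcases hpre with hm | hempty
  · congr 1
    rw [wrapAOuter_eq]
    simp only [List.nil_append]
    exact congrArg _ (flatMap_inner_eq_chunksB hm _ (split₀_ne_nil text.toList))
  · rw [hempty]
    simp [wrapAOuter]
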